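-- pv_equiv track=rewrite | github.com/Chandra-sekhar2002/Bank-Apllication-demo | rough.py | longestCommonPrefixLength
-- ===== SOURCE A (Python) =====
-- def longestCommonPrefixLength(arr1, arr2):
--     max_length = 0
--
--     # Function to find the length of the common prefix between two numbers
--     def commonPrefixLength(a, b):
--         a_str, b_str = str(a), str(b)
--         length = 0
--
--         # Compare digits one by one
--         for i in range(min(len(a_str), len(b_str))):
--             if a_str[i] == b_str[i]:
--                 length += 1
--             else:
--                 break
--
--         return length
--
--     # Compare all pairs of numbers from arr1 and arr2
--     for x in arr1:
--         for y in arr2: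
--             # Calculate the length of the common prefix for the current pair
--             max_length = max(max_length, commonPrefixLength(x, y))
--
--     return max_length
-- ===== SOURCE B (Python) =====
-- def longestCommonPrefixLength(arr1, arr2):
--     prefixes = set()
--     for x in arr1:
--         s = str(x)
--         for i in range(len(s)):
--             prefixes.add(s[:i+1])
--     best = 0
--     for y in arr2:
--         t = str(y)
--         k = 0
--         for j in range(len(t)):
--             if t[:j+1] in prefixes:
--                 k = j + 1
--         best = max(best, k)
--     return best
-- ===== Notes on version B (the rewrite author's own statement) =====
-- stated objective: faster
-- what changed: Instead of comparing every pair (x,y) digit by digit, B inserts every prefix of every str(x) into a hash set once and then, for each y, finds the longest prefix of str(y) present in the set, eliminating the inner scan over arr1.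
import Mathlib
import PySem

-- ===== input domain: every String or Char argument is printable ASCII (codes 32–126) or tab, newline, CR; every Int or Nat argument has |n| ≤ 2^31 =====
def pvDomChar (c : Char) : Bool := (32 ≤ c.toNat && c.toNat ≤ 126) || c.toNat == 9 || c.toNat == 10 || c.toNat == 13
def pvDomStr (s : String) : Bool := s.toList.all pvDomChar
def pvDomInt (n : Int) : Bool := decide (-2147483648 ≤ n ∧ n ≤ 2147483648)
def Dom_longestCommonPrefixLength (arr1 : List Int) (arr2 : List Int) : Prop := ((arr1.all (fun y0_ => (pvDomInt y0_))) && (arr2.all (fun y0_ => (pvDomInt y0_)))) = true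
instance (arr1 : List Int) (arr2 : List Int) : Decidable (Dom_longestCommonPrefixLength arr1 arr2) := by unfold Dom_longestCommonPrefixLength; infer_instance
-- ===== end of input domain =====

-- B replaces A's all-pairs digit comparison by a set of all prefixes of arr1's digit
-- strings matched against each str(y); same return value, asymptotically fewer steps.

-- ===== PORT A =====
-- Python's `for i in range(min(len,len)): if a_str[i]==b_str[i]: length+=1 else: break`
-- as the obvious structural recursion over the two character lists (stops at the first
-- mismatch or when either list — hence range(min(..)) — ends).
def pvCplGo : List Char → List Char → Int
  | a :: as, b :: bs => if a = b then 1 + pvCplGo as bs else 0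
  | _, _ => 0

def pvCommonPrefixLength (a b : Int) : Int :=
  -- str(a), str(b) → PySem.Int.toChars (exact)
  pvCplGo (PySem.Int.toChars a) (PySem.Int.toChars b)

def longestCommonPrefixLength (arr1 : List Int) (arr2 : List Int) : Int :=
  arr1.foldl (fun m x => arr2.foldl (fun m2 y => max m2 (pvCommonPrefixLength x y)) m) 0

-- ===== PORT B =====
-- `prefixes = set(); for x in arr1: for i in range(len(s)): prefixes.add(s[:i+1])`
-- (s[:i+1] = take (i+1), exact for a nonnegative in-range bound: PySem.List.slice_to_natCast)
def pvAltPrefixes (arr1 : List Int) : PySem.Set (List Char) :=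
  arr1.foldl (fun ps x =>
    let s := PySem.Int.toChars x
    (List.range s.length).foldl (fun ps i => PySem.Set.add ps (s.take (i+1))) ps)
    PySem.Set.empty

def longestCommonPrefixLength_alt (arr1 : List Int) (arr2 : List Int) : Int :=
  let prefixes := pvAltPrefixes arr1
  arr2.foldl (fun best y =>
    let t := PySem.Int.toChars y
    max best ((List.range t.length).foldl
      (fun k j => if t.take (j+1) ∈ prefixes then ((j : Int) + 1) else k) 0)) 0

-- ===== PRECONDITION & SPEC =====
def Spec_longestCommonPrefixLength (arr1 : List Int) (arr2 : List Int) (out : Int) : Prop := out = longestCommonPrefixLength_alt arr1 arr2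
instance (arr1 : List Int) (arr2 : List Int) (out : Int) : Decidable (Spec_longestCommonPrefixLength arr1 arr2 out) := by unfold Spec_longestCommonPrefixLength; infer_instance

-- ===== CLAIM (what is proved, stated in full; the proofs are below) =====
def Claim_equal_longestCommonPrefixLength : Prop := ∀ (arr1 : List Int) (arr2 : List Int), Dom_longestCommonPrefixLength arr1 arr2 → Spec_longestCommonPrefixLength arr1 arr2 (longestCommonPrefixLength arr1 arr2)

-- ===== LEMMAS AND PROOFS =====

/-- `foldl max` of `f` over a list, starting at 0. -/
def pvBigmax {α : Type} (f : α → Int) (l : List α) : Int :=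
  l.foldl (fun m a => max m (f a)) 0

theorem pvFoldlMax_mono {α : Type} (f : α → Int) (l : List α) (m : Int) :
    m ≤ l.foldl (fun m a => max m (f a)) m := by
  induction l generalizing m with
  | nil => simp
  | cons a l ih => exact le_trans (le_max_left m (f a)) (ih _)

theorem pvBigmax_nonneg {α : Type} (f : α → Int) (l : List α) : 0 ≤ pvBigmax f l :=
  pvFoldlMax_mono f l 0

theorem pvFoldlMax_hoist {α : Type} (f : α → Int) (l : List α) (m : Int) (hm : 0 ≤ m) :
    l.foldl (fun m a => max m (f a)) m = max m (pvBigmax f l) := by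
  induction l generalizing m with
  | nil =>
    simp [pvBigmax]; omega
  | cons a l ih =>
    have h1 : (a :: l).foldl (fun m a => max m (f a)) m
        = l.foldl (fun m a => max m (f a)) (max m (f a)) := rfl
    have h2 : pvBigmax f (a :: l) = l.foldl (fun m a => max m (f a)) (max 0 (f a)) := rfl
    rw [h1, h2, ih (max m (f a)) (le_trans hm (le_max_left _ _)),
        ih (max 0 (f a)) (le_max_left _ _)]
    simp only [Int.max_def]
    split_ifs <;> omega

theorem pvBigmax_cons {α : Type} (f : α → Int) (a : α) (l : List α) :
    pvBigmax f (a :: l) = max (max 0 (f a)) (pvBigmax f l) := by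
  have h : pvBigmax f (a :: l) = l.foldl (fun m a => max m (f a)) (max 0 (f a)) := rfl
  rw [h, pvFoldlMax_hoist f l _ (le_max_left _ _)]

theorem pvBigmax_le_iff {α : Type} (f : α → Int) (l : List α) (c : Int) :
    pvBigmax f l ≤ c ↔ 0 ≤ c ∧ ∀ a ∈ l, f a ≤ c := by
  induction l with
  | nil => simp [pvBigmax]
  | cons a l ih =>
    rw [pvBigmax_cons]
    constructor
    · intro h
      have h1 : max 0 (f a) ≤ c := le_trans (le_max_left _ _) h
      have h2 : pvBigmax f l ≤ c := le_trans (le_max_right _ _) h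
      refine ⟨le_trans (le_max_left _ _) h1, ?_⟩
      intro b hb
      rcases List.mem_cons.mp hb with h | h
      · subst h; exact le_trans (le_max_right _ _) h1
      · exact ((ih.mp h2).2) b h
    · rintro ⟨hc, hall⟩
      refine max_le (max_le hc (hall a (List.mem_cons_self))) ?_
      exact (ih.mpr ⟨hc, fun b hb => hall b (List.mem_cons_of_mem _ hb)⟩)

theorem pvLe_bigmax_iff {α : Type} (f : α → Int) (l : List α) (c : Int) :
    c ≤ pvBigmax f l ↔ c ≤ 0 ∨ ∃ a ∈ l, c ≤ f a := by
  induction l with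
  | nil => simp [pvBigmax]
  | cons a l ih =>
    rw [pvBigmax_cons]
    constructor
    · intro h
      rcases le_max_iff.mp h with h | h
      · rcases le_max_iff.mp h with h | h
        · exact Or.inl h
        · exact Or.inr ⟨a, List.mem_cons_self, h⟩
      · rcases ih.mp h with h | ⟨b, hb, hc⟩
        · exact Or.inl h
        · exact Or.inr ⟨b, List.mem_cons_of_mem _ hb, hc⟩
    · rintro (h | ⟨b, hb, hc⟩)
      · exact le_trans h (le_trans (le_max_left _ _) (le_max_left _ _))
      · rcases List.mem_cons.mp hb with h | h
        · subst h
          exact le_trans (le_trans hc (le_max_right 0 (f b))) (le_max_left _ _)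
        · exact le_trans (ih.mpr (Or.inr ⟨b, h, hc⟩)) (le_max_right _ _)

theorem pvLe_bigmax_of_mem {α : Type} (f : α → Int) {l : List α} {a : α} (h : a ∈ l) :
    f a ≤ pvBigmax f l :=
  (pvLe_bigmax_iff f l (f a)).mpr (Or.inr ⟨a, h, le_refl _⟩)

theorem pvCplGo_nonneg (s t : List Char) : 0 ≤ pvCplGo s t := by
  induction s generalizing t with
  | nil => simp [pvCplGo]
  | cons a s ih =>
    cases t with
    | nil => simp [pvCplGo]
    | cons b t =>
      simp only [pvCplGo]
      split_ifs
      · have := ih t; omega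
      · omega

theorem pvCplGo_le_right (s t : List Char) : pvCplGo s t ≤ (t.length : Int) := by
  induction s generalizing t with
  | nil =>
    cases t with
    | nil => simp [pvCplGo]
    | cons b t => simp [pvCplGo]; positivity
  | cons a s ih =>
    cases t with
    | nil => simp [pvCplGo]
    | cons b t =>
      simp only [pvCplGo, List.length_cons]
      split_ifs
      · have := ih t; push_cast; omega
      · push_cast; omega

/-- `take j t` is a prefix of `s` iff the common prefix of `s` and `t` has length ≥ j
    (for `j ≤ t.length`). -/
theorem pvTake_prefix_iff (s t : List Char) (j : Nat) (hj : j ≤ t.length) :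
    t.take j <+: s ↔ (j : Int) ≤ pvCplGo s t := by
  induction j generalizing s t with
  | zero => simpa using pvCplGo_nonneg s t
  | succ j ih =>
    cases t with
    | nil => simp at hj
    | cons c t =>
      cases s with
      | nil =>
        simp only [List.take_succ_cons, pvCplGo]
        constructor
        · intro h; exact absurd h (by simp [List.prefix_iff_eq_take])
        · intro h; omega
      | cons a s =>
        simp only [List.take_succ_cons, pvCplGo, List.cons_prefix_cons]
        by_cases hac : a = c
        · subst hac
          rw [if_pos rfl]
          rw [ih s t (by simpa using hj)]
          constructor
          · rintro ⟨-, h⟩; push_cast; omega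
          · intro h; refine ⟨by trivial, by push_cast at h ⊢; omega⟩
        · rw [if_neg hac]
          constructor
          · rintro ⟨h, -⟩; exact absurd h.symm hac
          · intro h; omega

/-- The fold `k := j+1 whenever P j` over `range n` returns the threshold `M` of a
    monotone-threshold predicate. -/
theorem pvThreshold_fold (n : Nat) (M : Int) (P : Nat → Prop) [DecidablePred P]
    (h0 : 0 ≤ M) (hn : M ≤ (n : Int))
    (hP : ∀ j, j < n → (P j ↔ (j : Int) + 1 ≤ M)) :
    (List.range n).foldl (fun k j => if P j then ((j : Int) + 1) else k) 0 = M := by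
  induction n with
  | zero => simp at hn ⊢; omega
  | succ n ih =>
    rw [List.range_succ, List.foldl_append]
    simp only [List.foldl_cons, List.foldl_nil]
    by_cases hM : M = (n : Int) + 1
    · rw [if_pos ((hP n (Nat.lt_succ_self n)).mpr (by omega))]
      omega
    · have hMn : M ≤ (n : Int) := by push_cast at hn; omega
      rw [if_neg (fun hp => absurd ((hP n (Nat.lt_succ_self n)).mp hp) (by omega))]
      exact ih hMn (fun j hj => hP j (Nat.lt_succ_of_lt hj))

theorem pvMem_inner_add (s : List Char) (n : Nat) (ps : PySem.Set (List Char))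
    (p : List Char) :
    p ∈ (List.range n).foldl (fun ps i => PySem.Set.add ps (s.take (i+1))) ps ↔
      p ∈ ps ∨ ∃ i < n, p = s.take (i+1) := by
  induction n with
  | zero => simp
  | succ n ih =>
    rw [List.range_succ, List.foldl_append]
    simp only [List.foldl_cons, List.foldl_nil, PySem.Set.mem_add, ih]
    constructor
    · rintro ((h | ⟨i, hi, rfl⟩) | h)
      · exact Or.inl h
      · exact Or.inr ⟨i, Nat.lt_succ_of_lt hi, rfl⟩
      · exact Or.inr ⟨n, Nat.lt_succ_self n, h⟩
    · rintro (h | ⟨i, hi, rfl⟩)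
      · exact Or.inl (Or.inl h)
      · rcases Nat.lt_succ_iff_lt_or_eq.mp hi with h | rfl
        · exact Or.inl (Or.inr ⟨i, h, rfl⟩)
        · exact Or.inr rfl

theorem pvMem_prefixes (arr1 : List Int) (p : List Char) :
    p ∈ pvAltPrefixes arr1 ↔
      ∃ x ∈ arr1, ∃ i < (PySem.Int.toChars x).length, p = (PySem.Int.toChars x).take (i+1) := by
  unfold pvAltPrefixes
  have key : ∀ (l : List Int) (ps : PySem.Set (List Char)),
      p ∈ l.foldl (fun ps x =>
          (List.range (PySem.Int.toChars x).length).foldl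
            (fun ps i => PySem.Set.add ps ((PySem.Int.toChars x).take (i+1))) ps) ps ↔
        p ∈ ps ∨ ∃ x ∈ l, ∃ i < (PySem.Int.toChars x).length, p = (PySem.Int.toChars x).take (i+1) := by
    intro l
    induction l with
    | nil => simp
    | cons x l ih =>
      intro ps
      simp only [List.foldl_cons, ih, pvMem_inner_add]
      constructor
      · rintro ((h | ⟨i, hi, rfl⟩) | ⟨z, hz, hrest⟩)
        · exact Or.inl h
        · exact Or.inr ⟨x, List.mem_cons_self, i, hi, rfl⟩
        · exact Or.inr ⟨z, List.mem_cons_of_mem _ hz, hrest⟩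
      · rintro (h | ⟨z, hz, hrest⟩)
        · exact Or.inl (Or.inl h)
        · rcases List.mem_cons.mp hz with rfl | hz
          · rcases hrest with ⟨i, hi, rfl⟩
            exact Or.inl (Or.inr ⟨i, hi, rfl⟩)
          · exact Or.inr ⟨z, hz, hrest⟩
  rw [key]
  simp [PySem.Set.empty]

/-- B's inner scan over `str(y)` equals the max over `arr1` of A's pairwise common
    prefix length. -/
theorem pvInner_eq_bigmax (arr1 : List Int) (y : Int) :
    (List.range (PySem.Int.toChars y).length).foldl
      (fun k j => if (PySem.Int.toChars y).take (j+1) ∈ pvAltPrefixes arr1 then ((j : Int) + 1) else k) 0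
      = pvBigmax (fun x => pvCommonPrefixLength x y) arr1 := by
  set t := PySem.Int.toChars y with ht
  set M := pvBigmax (fun x => pvCommonPrefixLength x y) arr1 with hM
  apply pvThreshold_fold
  · exact pvBigmax_nonneg _ _
  · rw [hM, pvBigmax_le_iff]
    exact ⟨by positivity, fun x _ => pvCplGo_le_right _ _⟩
  · intro j hj
    rw [pvMem_prefixes]
    constructor
    · rintro ⟨x, hx, i, hi, hp⟩
      have hpre : t.take (j+1) <+: PySem.Int.toChars x := by
        rw [hp]; exact List.take_prefix _ _
      have h := (pvTake_prefix_iff (PySem.Int.toChars x) t (j+1) (by omega)).mp hpre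
      calc ((j : Int) + 1) ≤ pvCommonPrefixLength x y := by
            unfold pvCommonPrefixLength; rw [← ht]; push_cast at h ⊢; omega
        _ ≤ M := pvLe_bigmax_of_mem _ hx
    · intro h
      rcases (pvLe_bigmax_iff _ _ _).mp (le_trans (le_refl _) (hM ▸ h)) with h0 | ⟨x, hx, hle⟩
      · omega
      · have hpre : t.take (j+1) <+: PySem.Int.toChars x := by
          apply (pvTake_prefix_iff (PySem.Int.toChars x) t (j+1) (by omega)).mpr
          unfold pvCommonPrefixLength at hle; rw [← ht] at hle; push_cast at hle ⊢; omega
        have hlen : j + 1 ≤ (PySem.Int.toChars x).length := by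
          have := hpre.length_le
          rw [List.length_take] at this
          omega
        refine ⟨x, hx, j, by omega, ?_⟩
        rw [List.prefix_iff_eq_take.mp hpre, List.length_take]
        congr 1; omega

/-- A's nested fold is the double bigmax. -/
theorem pvA_eq_bigmax (arr1 arr2 : List Int) :
    longestCommonPrefixLength arr1 arr2 =
      pvBigmax (fun x => pvBigmax (fun y => pvCommonPrefixLength x y) arr2) arr1 := by
  unfold longestCommonPrefixLength
  have key : ∀ (l : List Int) (m : Int), 0 ≤ m →
      l.foldl (fun m x => arr2.foldl (fun m2 y => max m2 (pvCommonPrefixLength x y)) m) m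
        = max m (pvBigmax (fun x => pvBigmax (fun y => pvCommonPrefixLength x y) arr2) l) := by
    intro l
    induction l with
    | nil => intro m hm; simp [pvBigmax]; omega
    | cons x l ih =>
      intro m hm
      simp only [List.foldl_cons]
      rw [pvFoldlMax_hoist (fun y => pvCommonPrefixLength x y) arr2 m hm]
      rw [ih _ (le_trans hm (le_max_left _ _))]
      rw [pvBigmax_cons]
      have h0 : 0 ≤ pvBigmax (fun y => pvCommonPrefixLength x y) arr2 := pvBigmax_nonneg _ _
      simp only [Int.max_def]
      split_ifs <;> omega
  rw [key arr1 0 (le_refl 0)]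
  have h0 := pvBigmax_nonneg (fun x => pvBigmax (fun y => pvCommonPrefixLength x y) arr2) arr1
  omega

/-- B is the double bigmax in the other order. -/
theorem pvB_eq_bigmax (arr1 arr2 : List Int) :
    longestCommonPrefixLength_alt arr1 arr2 =
      pvBigmax (fun y => pvBigmax (fun x => pvCommonPrefixLength x y) arr1) arr2 := by
  unfold longestCommonPrefixLength_alt
  simp only [pvInner_eq_bigmax]
  rfl

/-- The two double maxima coincide. -/
theorem pvSwap (arr1 arr2 : List Int) :
    pvBigmax (fun x => pvBigmax (fun y => pvCommonPrefixLength x y) arr2) arr1 =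
      pvBigmax (fun y => pvBigmax (fun x => pvCommonPrefixLength x y) arr1) arr2 := by
  apply le_antisymm
  · rw [pvBigmax_le_iff]
    refine ⟨pvBigmax_nonneg _ _, fun x hx => ?_⟩
    rw [pvBigmax_le_iff]
    refine ⟨pvBigmax_nonneg _ _, fun y hy => ?_⟩
    exact le_trans (pvLe_bigmax_of_mem (fun x => pvCommonPrefixLength x y) hx)
      (pvLe_bigmax_of_mem _ hy)
  · rw [pvBigmax_le_iff]
    refine ⟨pvBigmax_nonneg _ _, fun y hy => ?_⟩
    rw [pvBigmax_le_iff]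
    refine ⟨pvBigmax_nonneg _ _, fun x hx => ?_⟩
    exact le_trans (pvLe_bigmax_of_mem (fun y => pvCommonPrefixLength x y) hy)
      (pvLe_bigmax_of_mem _ hx)

-- ===== VERDICT (by name: the statement is the Claim_ definition above) =====
theorem longestCommonPrefixLength_spec : Claim_equal_longestCommonPrefixLength := by
  intro arr1 arr2 _
  unfold Spec_longestCommonPrefixLength
  rw [pvA_eq_bigmax, pvB_eq_bigmax, pvSwap]
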